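/-
  LOOPS: `ReachVia.loop` set up from the context of a walk.

  A walk stops at a loop head (a cut point of `u_walk … until […]`) with the state `s` described by hypotheses. The user makes
  that description INVARIANT — generalises what varies (`w_rbx : s.reg .rbx = 0` to `s.reg .rbx = UInt64.ofNat i`), replaces the
  exact memory `w_mem` by what stays true (`Mem.SameExcept ws u.mem s.mem`, the stack slots as `s.mem.readLE a k = x`), clears
  what is not invariant — and then

      u_loop [i, …] (fun v => measure …) (fun v => postcondition …)        (the postcondition is optional)

  takes EVERY hypothesis of the context that mentions `s` or a ghost variable as the invariant:

      Inv v := ∃ i …, H₁[v] ∧ … ∧ Hₙ[v]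

  applies `ReachVia.trans (ReachVia.loop measure ?body s ?init) ?exit`, proves `?init` from the hypotheses themselves, and leaves

      body   the context as it was, about a fresh state (the SAME hypothesis names, so the body is walked exactly like the
             code before the loop): `ReachVia L μ I s (fun v' => Post v' ∨ (Inv v' ∧ measure v' < measure s))`
      exit   `∀ v, Post v → ReachVia L μ I v P` (the goal of before the loop), `v` and the hypothesis introduced.
             WITHOUT a postcondition the loop's is the goal's `P`: the body is then walked through the loop's exit to the end of
             the function (`ReachVia.done (Or.inl …)` there), and there is no exit goal

  At the back edge `u_loop_back [i + 1, …]` states `Or.inr ⟨⟨witnesses, the conjuncts⟩, the measure⟩`: the conjuncts that are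
  hypotheses of the context (the walker's `w_r14 : s'.reg .r14 = c` for a register the body did not change) are closed by
  assumption, the others and the measure are left, in the order of the context. At a loop exit: `u_loop_exit`.
-/
import UserX.Walk
import UserX.FrameTac

namespace UserX.Walk
open Lean Meta Elab Tactic
open X86 X86.User

/-- The conjunction of a non-empty list of propositions, right-nested. -/
def mkAndList : List Expr → Expr
  | [] => mkConst ``True
  | [p] => p
  | p :: ps => mkAnd p (mkAndList ps)

/-- The proof of `mkAndList` from the proofs of its members. -/
def mkAndIntroList : List (Expr × Expr) → Expr
  | [] => mkConst ``True.intro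
  | [(_, h)] => h
  | (p, h) :: rest =>
    let restTy := mkAndList (rest.map (·.1))
    mkApp4 (mkConst ``And.intro) p restTy h (mkAndIntroList rest)

/-- `u_loop [i, …] m Q` (ghost variables, measure, postcondition of the loop): see the file header. (No keywords: `measure`
and `post` stay ordinary identifiers.) -/
syntax "u_loop" (" [" ident,* "]")? ppSpace colGt term:max (ppSpace colGt term:max)? : tactic

elab_rules : tactic
  | `(tactic| u_loop $[[$ghosts,*]]? $m $[$q?]?) => withMainContext do
    let g ← getMainGoal
    let rest := (← getGoals).drop 1
    let t := (← instantiateMVars (← g.getType)).cleanupAnnotations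
    unless t.isAppOfArity ``ReachVia 5 do
      throwError "u_loop: the goal is not `ReachVia L μ I s P`"
    let args := t.getAppArgs
    let s := args[3]!.consumeMData
    unless s.isFVar do
      throwError "u_loop: the state of the goal is not a variable:{indentExpr s}"
    let stateTy := mkConst ``X86.User.State
    let ghostIds : Array Syntax := match ghosts with
      | some gs => gs.getElems.map (·.raw)
      | none => #[]
    let ghostVars ← ghostIds.mapM fun id => do
      let some d := (← getLCtx).findFromUserName? id.getId | throwError "u_loop: no variable {id}"
      pure d.toExpr
    -- the hypotheses that make the invariant
    let mentions (e : Expr) : Bool := e.containsFVar s.fvarId! || ghostVars.any fun x => e.containsFVar x.fvarId!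
    let mut hyps : Array LocalDecl := #[]
    for d in ← getLCtx do
      if d.isImplementationDetail then continue
      if d.toExpr == s || ghostVars.contains d.toExpr then continue
      let ty ← instantiateMVars d.type
      if mentions ty then
        unless ← isProp ty do
          throwError "u_loop: {d.userName} depends on the state (or a ghost variable) and is not a proposition"
        hyps := hyps.push d
    let hypTypes ← hyps.mapM fun d => instantiateMVars d.type
    -- Inv := fun v => ∃ ghosts, conjunction
    let invOf (v : Expr) : MetaM Expr := do
      let conj := mkAndList (hypTypes.toList.map fun ty => ty.replaceFVar s v)
      let mut body := conj
      for x in ghostVars.reverse do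
        let lam ← mkLambdaFVars #[x] body
        body ← mkAppM ``Exists #[lam]
      pure body
    let inv ← withLocalDeclD `v stateTy fun v => do
      mkLambdaFVars #[v] (← invOf v)
    let meas ← Term.elabTermEnsuringType m (← mkArrow stateTy (mkConst ``Nat))
    -- without a postcondition the loop's is the goal's: the body is walked through the loop's exit to the end
    let post ← match q? with
      | some q => Term.elabTermEnsuringType q (← mkArrow stateTy (mkSort Level.zero))
      | none => pure args[4]!
    Term.synthesizeSyntheticMVarsNoPostponing
    let meas ← instantiateMVars meas
    let post ← instantiateMVars post
    -- the proof of `Inv s` from the hypotheses themselves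
    let conjProof := mkAndIntroList (hyps.toList.map fun d => (d.type, d.toExpr))
    let mut initProof := conjProof
    let mut initTy := mkAndList hypTypes.toList
    for x in ghostVars.reverse do
      let lam ← mkLambdaFVars #[x] initTy
      initProof ← mkAppOptM ``Exists.intro #[none, lam, x, initProof]
      initTy ← mkAppM ``Exists #[lam]
    -- the rule
    let L := args[0]!
    let μ := args[1]!
    let I := args[2]!
    let P := args[4]!
    let bodyTy ← withLocalDeclD `v stateTy fun v => do
      let target ← withLocalDeclD `v' stateTy fun v' => do
        let dec ← mkAppM ``LT.lt #[(mkApp meas v').headBeta, (mkApp meas v).headBeta]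
        let again := mkAnd (mkApp inv v').headBeta dec
        mkLambdaFVars #[v'] (mkOr (mkApp post v').headBeta again)
      let reach := mkAppN (mkConst ``ReachVia) #[L, μ, I, v, target]
      mkForallFVars #[v] (← mkArrow (mkApp inv v).headBeta reach)
    let bodyG ← mkFreshExprSyntheticOpaqueMVar bodyTy `body
    let exitTy ← withLocalDeclD `v stateTy fun v => do
      let reach := mkAppN (mkConst ``ReachVia) #[L, μ, I, v, P]
      mkForallFVars #[v] (← mkArrow (mkApp post v).headBeta reach)
    let exitG ← mkFreshExprSyntheticOpaqueMVar exitTy `exit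
    let loopPf ← mkAppOptM ``ReachVia.loop #[L, μ, I, inv, post, meas, bodyG, s, initProof]
    let pf ← mkAppOptM ``ReachVia.trans #[L, μ, I, s, post, P, loopPf, exitG]
    g.assign pf
    -- the body: the same names about a fresh state
    let sName := (← s.fvarId!.getDecl).userName
    let (vId, bodyG1) ← bodyG.mvarId!.intro sName
    let (hId, bodyG2) ← bodyG1.intro `u_inv
    let mut cur := bodyG2
    let mut curH := hId
    -- open the existentials
    for x in ghostVars do
      let xName := (← x.fvarId!.getDecl).userName
      let subgoals ← cur.cases curH #[{ varNames := [xName, `u_inv] }]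
      let #[sub] := subgoals | throwError "u_loop: opening the invariant failed"
      cur := sub.mvarId
      curH := sub.fields[1]!.fvarId!
    -- open the conjunction
    let n := hyps.size
    for i in [0:n] do
      let name := hyps[i]!.userName
      if i + 1 == n then
        cur ← cur.rename curH name
      else
        let subgoals ← cur.cases curH #[{ varNames := [name, `u_inv] }]
        let #[sub] := subgoals | throwError "u_loop: opening the invariant failed"
        cur := sub.mvarId
        curH := sub.fields[1]!.fvarId!
    let _ := vId
    -- drop the description of the state before the loop from the body and the exit
    let stale := ghostVars.map (·.fvarId!) ++ #[s.fvarId!] ++ hyps.map (·.fvarId)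
    let bodyFinal ← cur.tryClearMany stale
    let (exitV, exitG1) ← exitG.mvarId!.intro sName
    let (exitH, exitG2) ← exitG1.intro `u_post
    if q?.isNone then
      exitG2.withContext do
        exitG2.assign (← mkAppOptM ``ReachVia.done #[L, μ, I, mkFVar exitV, args[4]!, mkFVar exitH])
      setGoals ([bodyFinal] ++ rest)
    else
      let exitG3 ← exitG2.tryClearMany stale
      setGoals ([bodyFinal, exitG3] ++ rest)

/-- At the back edge of a loop set up by `u_loop`: the invariant again, with the given witnesses for the ghost variables, and
the measure. Conjuncts that are hypotheses of the context are closed, a register frame for a larger list too, a load that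
reads through the stores of the body to a fact of the loop head (`u_resolve`), a footprint (`u_same`); the others are left in
the order of the context, the measure last. -/
syntax "u_loop_back" (" [" term,* "]")? : tactic

elab_rules : tactic
  | `(tactic| u_loop_back $[[$ws,*]]?) => do
    match ws with
    | some ws => evalTactic (← `(tactic| refine X86.User.ReachVia.done (Or.inr ⟨⟨$ws,*, ?_⟩, ?_⟩)))
    | none => evalTactic (← `(tactic| refine X86.User.ReachVia.done (Or.inr ⟨?_, ?_⟩)))
    let gs ← getUnsolvedGoals
    let invGoal :: decGoal :: rest := gs | throwError "u_loop_back: expected the invariant and the measure as goals"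
    setGoals [invGoal]
    evalTactic (← `(tactic| (repeat' (with_reducible apply And.intro)) <;>
      (try (first
        | (with_reducible assumption)
        | (exact X86.User.RegsKept.mono_all (by with_reducible assumption) (by rfl))
        | (u_resolve; done)
        | u_same))))
    let left ← getUnsolvedGoals
    setGoals (left ++ [decGoal] ++ rest)

/-- At an exit of a loop set up by `u_loop`: the loop's postcondition. -/
macro "u_loop_exit" : tactic => `(tactic| refine X86.User.ReachVia.done (Or.inl ?_))

end UserX.Walk
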